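-- pv_equiv track=rewrite | github.com/rtviii/ribosome.xyz-backend | ribetl/ciftools/transpose_ligand.py | hl_ixs
-- ===== SOURCE A (Python) =====
-- from typing import Dict, List, Tuple, TypedDict, Union, Callable
--
-- def hl_ixs(sequence:str,  ixs:List[int]):
-- 	"""Highlight indices"""
-- 	CRED = '\033[91m'
-- 	CEND = '\033[0m'
-- 	_ = ''
-- 	for i,v in enumerate(sequence):
-- 		if i in ixs: _ += CRED + v +CEND
-- 		else: 	 	 _ += v
-- 	return _
-- ===== SOURCE B (Python) =====
-- def hl_ixs(sequence, ixs):
--     """Highlight indices"""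
--     CRED = '\033[91m'
--     CEND = '\033[0m'
--     chars = list(sequence)
--     for i in set(ixs):
--         if 0 <= i < len(chars):
--             chars[i] = CRED + chars[i] + CEND
--     return ''.join(chars)
-- ===== Notes on version B (the rewrite author's own statement) =====
-- stated objective: faster
-- what changed: Instead of scanning every character and testing 'i in ixs' (a linear scan of ixs per character), B dedupes ixs once with set(), scatter-writes the wrapped value only at in-range indices into a char array, and joins it.
import Mathlib
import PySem

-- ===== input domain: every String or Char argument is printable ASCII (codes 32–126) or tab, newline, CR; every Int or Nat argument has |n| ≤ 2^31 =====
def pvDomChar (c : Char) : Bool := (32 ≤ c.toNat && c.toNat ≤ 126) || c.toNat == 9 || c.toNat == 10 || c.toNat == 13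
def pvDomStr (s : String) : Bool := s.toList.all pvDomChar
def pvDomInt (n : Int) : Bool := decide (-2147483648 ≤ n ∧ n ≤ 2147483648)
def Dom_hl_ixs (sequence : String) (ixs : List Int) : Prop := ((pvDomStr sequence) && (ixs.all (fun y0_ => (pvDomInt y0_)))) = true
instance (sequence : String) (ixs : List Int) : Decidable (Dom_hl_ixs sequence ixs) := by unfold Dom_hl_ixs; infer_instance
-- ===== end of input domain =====

-- B dedupes the indices once and scatter-writes the wrapped value only at in-range
-- positions into a char array, instead of scanning ixs for every character (faster).

-- ===== PORT A =====
-- A: scan the sequence with enumerate, append a wrapped or plain char to the accumulator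
def hl_ixs (sequence : String) (ixs : List Int) : String :=
  let CRED := "\x1b[91m"
  let CEND := "\x1b[0m"
  (PySem.List.enumerate sequence.toList).foldl
    (fun acc p =>
      if p.1 ∈ ixs then acc ++ (CRED ++ String.mk [p.2] ++ CEND)
      else acc ++ String.mk [p.2]) ""

-- ===== PORT B =====
-- B: chars = list(sequence); for i in set(ixs): if in range, wrap chars[i]; join
def hl_ixs_alt (sequence : String) (ixs : List Int) : String :=
  let CRED := "\x1b[91m"
  let CEND := "\x1b[0m"
  let chars0 : List String := sequence.toList.map (fun c => String.mk [c])
  let chars := (PySem.Set.ofList ixs).foldl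
    (fun cs i =>
      if 0 ≤ i ∧ i < (cs.length : Int) then
        cs.set i.toNat (CRED ++ cs.getD i.toNat "" ++ CEND)
      else cs) chars0
  String.join chars

-- ===== PRECONDITION & SPEC =====
def Spec_hl_ixs (sequence : String) (ixs : List Int) (out : String) : Prop := out = hl_ixs_alt sequence ixs
instance (sequence : String) (ixs : List Int) (out : String) : Decidable (Spec_hl_ixs sequence ixs out) := by unfold Spec_hl_ixs; infer_instance

-- ===== CLAIM (what is proved, stated in full; the proofs are below) =====
def Claim_equal_hl_ixs : Prop := ∀ (sequence : String) (ixs : List Int), Dom_hl_ixs sequence ixs → Spec_hl_ixs sequence ixs (hl_ixs sequence ixs)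

-- ===== LEMMAS AND PROOFS =====

-- per-character rendering both sides produce
def pvG (ixs : List Int) (j : Int) (c : Char) : String :=
  if j ∈ ixs then "\x1b[91m" ++ String.mk [c] ++ "\x1b[0m" else String.mk [c]

theorem pv_join_cons (s : String) (l : List String) :
    String.join (s :: l) = s ++ String.join l := by
  simp [String.join_eq]

-- A's fold equals the join of the per-character renderings, any start index, any acc
theorem pvA_fold (ixs : List Int) (cs : List Char) : ∀ (k : Int) (acc : String),
    (PySem.List.enumerate cs k).foldl
      (fun acc p =>
        if p.1 ∈ ixs then acc ++ ("\x1b[91m" ++ String.mk [p.2] ++ "\x1b[0m")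
        else acc ++ String.mk [p.2]) acc
    = acc ++ String.join ((PySem.List.enumerate cs k).map (fun p => pvG ixs p.1 p.2)) := by
  induction cs with
  | nil => intro k acc; simp [PySem.List.enumerate, String.join, String.append_empty]
  | cons c cs ih =>
    intro k acc
    rw [PySem.List.enumerate_cons]
    simp only [List.foldl_cons, List.map_cons, pv_join_cons]
    rw [ih]
    by_cases h : k ∈ ixs <;> simp [pvG, h, String.append_assoc]

-- B's scatter-write fold, for distinct indices, rewrites exactly the listed in-range positions
theorem pvB_fold (red : String → String) :
    ∀ (L : List Int), L.Nodup → ∀ (cs : List String),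
    (L.foldl
      (fun cs i =>
        if 0 ≤ i ∧ i < (cs.length : Int) then
          cs.set i.toNat (red (cs.getD i.toNat ""))
        else cs) cs)
    = cs.mapIdx (fun j s => if (j : Int) ∈ L then red s else s) := by
  intro L
  induction L with
  | nil =>
    intro _ cs
    rw [List.foldl_nil]
    apply List.ext_getElem
    · simp
    · intro j hj hj'
      simp
  | cons i L ih =>
    intro hnd cs
    have hi : i ∉ L := (List.nodup_cons.mp hnd).1
    have hndL : L.Nodup := (List.nodup_cons.mp hnd).2
    simp only [List.foldl_cons]
    by_cases h : 0 ≤ i ∧ i < (cs.length : Int)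
    · rw [if_pos h, ih hndL]
      have hn : i.toNat < cs.length := by omega
      have hcast : (i.toNat : Int) = i := Int.toNat_of_nonneg h.1
      apply List.ext_getElem
      · simp
      · intro j hj hj'
        simp only [List.getElem_mapIdx]
        by_cases hji : j = i.toNat
        · have hjI : (j : Int) = i := by rw [hji]; exact hcast
          have h1 : ¬ ((j : Int) ∈ L) := by rw [hjI]; exact hi
          have h2 : (j : Int) ∈ i :: L := by rw [hjI]; exact List.mem_cons_self ..
          rw [if_neg h1, if_pos h2, List.getElem_set, if_pos hji.symm,
              List.getD_eq_getElem cs "" hn]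
          rw [show cs[j] = cs[i.toNat] from by simp [hji]]
        · have hne : (j : Int) ≠ i := by
            intro hc; apply hji; omega
          have hmem : ((j : Int) ∈ i :: L) ↔ ((j : Int) ∈ L) := by
            simp [List.mem_cons, hne]
          rw [List.getElem_set, if_neg (show ¬ (i.toNat = j) from fun hc => hji hc.symm)]
          simp only [hmem]
    · rw [if_neg h, ih hndL]
      apply List.ext_getElem
      · simp
      · intro j hj hj'
        have hjc : j < cs.length := by simpa using hj
        simp only [List.getElem_mapIdx]
        have hne : (j : Int) ≠ i := by
          intro hc
          apply h
          constructor <;> omega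
        have hmem : ((j : Int) ∈ i :: L) ↔ ((j : Int) ∈ L) := by
          simp [List.mem_cons, hne]
        simp only [hmem]

theorem hl_ixs_alt_eq (sequence : String) (ixs : List Int) :
    hl_ixs_alt sequence ixs
    = String.join (sequence.toList.mapIdx (fun j c => pvG ixs (j : Int) c)) := by
  have h1 := pvB_fold (fun s => "\x1b[91m" ++ s ++ "\x1b[0m") (PySem.Set.ofList ixs)
      (PySem.Set.nodup_ofList ixs) (sequence.toList.map (fun c => String.mk [c]))
  calc hl_ixs_alt sequence ixs
      = String.join ((sequence.toList.map (fun c => String.mk [c])).mapIdx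
          (fun j s => if (j : Int) ∈ PySem.Set.ofList ixs then "\x1b[91m" ++ s ++ "\x1b[0m" else s)) :=
        congrArg String.join h1
    _ = String.join (sequence.toList.mapIdx (fun j c => pvG ixs (j : Int) c)) := by
        congr 1
        apply List.ext_getElem
        · simp
        · intro j hj hj'
          simp only [List.getElem_mapIdx, List.getElem_map]
          simp [pvG, PySem.Set.mem_ofList]

theorem hl_ixs_eq (sequence : String) (ixs : List Int) :
    hl_ixs sequence ixs
    = String.join (sequence.toList.mapIdx (fun j c => pvG ixs (j : Int) c)) := by
  unfold hl_ixs
  rw [pvA_fold, String.empty_append]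
  congr 1
  apply List.ext_getElem
  · simp [PySem.List.length_enumerate]
  · intro j hj hj'
    simp only [List.getElem_map, List.getElem_mapIdx, PySem.List.getElem_enumerate] at *
    simp

-- ===== VERDICT (by name: the statement is the Claim_ definition above) =====
theorem hl_ixs_spec : Claim_equal_hl_ixs := by
  intro sequence ixs _
  show hl_ixs sequence ixs = hl_ixs_alt sequence ixs
  rw [hl_ixs_eq, hl_ixs_alt_eq]
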